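-- pv_equiv track=rewrite | github.com/tozmuda/ASD-2023 | done_exercises/zad15/zad15.py | lufthansa
-- ===== SOURCE A (Python) =====
-- def find(v, parent):
--     if parent[v]!=v:
--         v=find(parent[v], parent)
--     return parent[v]
--
-- def union(u, v, parent, rank):
--     u=find(u, parent)
--     v=find(v, parent)
--     if u==v: return False
--     if rank[u]>rank[v]:
--         parent[v]=u
--         rank[u]+=rank[v]
--     else:
--         parent[u]=v
--         rank[v]+=rank[u]
--     return True
--
-- def lufthansa ( G ):
--     n=len(G)
--
--     edges=[]
--     for i in range(n):
--         for v, w in G[i]: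
--             if i<v:
--                 edges.append((i, v, w))
--     edges.sort(key=lambda x: x[2], reverse=True)
--
--     parent=[i for i in range(n)]
--     rank=[1 for _ in range(n)]
--     spining_sum=0
--     max_not_taken=0
--     all_sum=0
--     flag=1
--     for i in range(len(edges)):
--         u, v, w = edges[i]
--         all_sum+=w
--         if union(u, v, parent, rank):
--             spining_sum+=w
--         elif flag:
--             flag=False
--             max_not_taken=w
--
--     return all_sum-max_not_taken-spining_sum
-- ===== SOURCE B (Python) =====
-- def lufthansa(G):
--     # Kruskal decisions kept, but connectivity via flat component labels
--     # (relabel on merge) instead of union-find; answer = sum of rejected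
--     # edges minus the first (heaviest) rejected edge.
--     n = len(G)
--     edges = [(i, v, w) for i in range(n) for v, w in G[i] if i < v]
--     edges.sort(key=lambda e: e[2], reverse=True)
--     comp = list(range(n))
--     rejected = []
--     for u, v, w in edges:
--         cu, cv = comp[u], comp[v]
--         if cu == cv:
--             rejected.append(w)
--         else:
--             comp = [cv if c == cu else c for c in comp]
--     return sum(rejected) - (rejected[0] if rejected else 0)
-- ===== Notes on version B (the rewrite author's own statement) =====
-- stated objective: simpler
-- what changed: Replaces the recursive union-find (find/union with parent and rank arrays) by flat component labels that are relabelled on each merge, and replaces the four running counters (all_sum, spining_sum, max_not_taken, flag) by a single list of rejected edge weights, returning sum(rejected) minus its first element.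
import Mathlib
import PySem

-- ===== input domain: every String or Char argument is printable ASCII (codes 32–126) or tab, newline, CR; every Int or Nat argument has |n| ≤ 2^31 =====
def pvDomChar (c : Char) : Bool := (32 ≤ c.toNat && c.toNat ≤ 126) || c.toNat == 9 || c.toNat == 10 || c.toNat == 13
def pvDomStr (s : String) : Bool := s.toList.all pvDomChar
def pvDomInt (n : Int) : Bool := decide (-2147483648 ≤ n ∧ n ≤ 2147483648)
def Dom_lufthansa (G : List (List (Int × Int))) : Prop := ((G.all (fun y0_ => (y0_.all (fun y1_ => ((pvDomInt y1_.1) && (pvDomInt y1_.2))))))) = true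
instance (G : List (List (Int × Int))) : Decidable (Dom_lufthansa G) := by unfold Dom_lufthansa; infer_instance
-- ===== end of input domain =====

-- B replaces A's recursive union-find by flat component labels relabelled on each
-- merge, and the four running counters by one list of rejected edge weights (objective: simpler).

-- ===== PORT A =====
-- find(v, parent); fuel (parent.length+1 at call sites) only makes the Python recursion
-- structural — inside Pre_ it is never exhausted (proved below); none = IndexError.
def pvFindA (fuel : Nat) (v : Int) (parent : List Int) : Option Int :=
  match fuel with
  | 0 => none
  | fuel + 1 =>
    match PySem.List.pyGet? parent v with
    | none => none
    | some pv =>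
      if pv ≠ v then
        match pvFindA fuel pv parent with
        | none => none
        | some r => PySem.List.pyGet? parent r
      else PySem.List.pyGet? parent v

-- union(u, v, parent, rank)
def pvUnionA (u v : Int) (parent rank : List Int) : Option (Bool × List Int × List Int) :=
  match pvFindA (parent.length + 1) u parent with
  | none => none
  | some u' =>
    match pvFindA (parent.length + 1) v parent with
    | none => none
    | some v' =>
      if u' = v' then some (false, parent, rank)
      else
        match PySem.List.pyGet? rank u', PySem.List.pyGet? rank v' with
        | some ru, some rv =>
          if ru > rv then
            match PySem.List.pySet? parent v' u', PySem.List.pySet? rank u' (ru + rv) with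
            | some parent', some rank' => some (true, parent', rank')
            | _, _ => none
          else
            match PySem.List.pySet? parent u' v', PySem.List.pySet? rank v' (rv + ru) with
            | some parent', some rank' => some (true, parent', rank')
            | _, _ => none
        | _, _ => none

-- edges=[]; for i in range(n): for v,w in G[i]: if i<v: edges.append((i,v,w))
def pvEdgesA (G : List (List (Int × Int))) : List (Int × Int × Int) :=
  (PySem.List.enumerate G 0).foldl
    (fun es p => p.2.foldl (fun es vw => if p.1 < vw.1 then es ++ [(p.1, vw.1, vw.2)] else es) es) []

-- one iteration of A's main loop; state (parent, rank, spining_sum, max_not_taken, all_sum, flag)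
def pvStepA (s : Option (List Int × List Int × Int × Int × Int × Bool)) (e : Int × Int × Int) :
    Option (List Int × List Int × Int × Int × Int × Bool) :=
  match s with
  | none => none
  | some (parent, rank, spin, maxnot, allsum, flag) =>
    match pvUnionA e.1 e.2.1 parent rank with
    | none => none
    | some (b, parent', rank') =>
      if b then some (parent', rank', spin + e.2.2, maxnot, allsum + e.2.2, flag)
      else if flag then some (parent', rank', spin, e.2.2, allsum + e.2.2, false)
      else some (parent', rank', spin, maxnot, allsum + e.2.2, flag)

def lufthansa (G : List (List (Int × Int))) : Int :=
  let edges := PySem.List.sorted (pvEdgesA G) (fun e => e.2.2) true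
  match (PySem.List.pyRange 0 (edges.length : Int) 1).foldl
      (fun s i => pvStepA s (PySem.List.pyGetD edges i (0, 0, 0)))
      (some (PySem.List.pyRange 0 (G.length : Int) 1, List.replicate G.length (1 : Int), 0, 0, 0, true)) with
  | none => 0
  | some (_, _, spin, maxnot, allsum, _) => allsum - maxnot - spin

-- ===== PORT B =====
-- edges = [(i, v, w) for i in range(n) for v, w in G[i] if i < v]
def pvEdgesB (G : List (List (Int × Int))) : List (Int × Int × Int) :=
  (PySem.List.enumerate G 0).flatMap
    (fun p => (p.2.filter (fun vw => p.1 < vw.1)).map (fun vw => (p.1, vw.1, vw.2)))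

-- one iteration of B's loop; state (comp, rejected)
def pvStepB (s : Option (List Int × List Int)) (e : Int × Int × Int) :
    Option (List Int × List Int) :=
  match s with
  | none => none
  | some (comp, rej) =>
    match PySem.List.pyGet? comp e.1, PySem.List.pyGet? comp e.2.1 with
    | some cu, some cv =>
      if cu = cv then some (comp, rej ++ [e.2.2])
      else some (comp.map (fun c => if c = cu then cv else c), rej)
    | _, _ => none

def lufthansa_alt (G : List (List (Int × Int))) : Int :=
  let edges := PySem.List.sorted (pvEdgesB G) (fun e => e.2.2) true
  match edges.foldl pvStepB (some (PySem.List.pyRange 0 (G.length : Int) 1, [])) with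
  | none => 0
  | some (_, rej) => rej.foldl (· + ·) 0 - (match rej with | [] => 0 | h :: _ => h)

-- ===== PRECONDITION & SPEC =====
-- Pre_ excludes exactly the inputs where some relevant edge (i < v) names a vertex
-- v ≥ len(G): there both Pythons raise IndexError (A in find, B at comp[v]).
def Pre_lufthansa (G : List (List (Int × Int))) : Prop :=
  ∀ p ∈ PySem.List.enumerate G 0, ∀ vw ∈ p.2, p.1 < vw.1 → vw.1 < (G.length : Int)
instance (G : List (List (Int × Int))) : Decidable (Pre_lufthansa G) := by
  unfold Pre_lufthansa; infer_instance

def pvWitness_lufthansa : (List (List (Int × Int))) := [[(1, 7)], [(0, 7), (1, 3)]]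

def Spec_lufthansa (G : List (List (Int × Int))) (out : Int) : Prop := out = lufthansa_alt G
instance (G : List (List (Int × Int))) (out : Int) : Decidable (Spec_lufthansa G out) := by unfold Spec_lufthansa; infer_instance

-- ===== CLAIM (what is proved, stated in full; the proofs are below) =====
def Claim_equal_lufthansa : Prop := ∀ (G : List (List (Int × Int))), Dom_lufthansa G → Pre_lufthansa G → Spec_lufthansa G (lufthansa G)

-- ===== LEMMAS AND PROOFS =====

-- one step of parent-chasing (total form; equals parent[x] whenever x is in range)
def pvStep (parent : List Int) (x : Int) : Int := (PySem.List.pyGet? parent x).getD x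

def pvIter (parent : List Int) : Nat → Int → Int
  | 0, x => x
  | k + 1, x => pvStep parent (pvIter parent k x)

def pvFix (parent : List Int) (x : Int) : Prop := pvStep parent x = x

def pvRoot (parent : List Int) (x : Int) : Int := pvIter parent parent.length x

def pvRange (n : Nat) (x : Int) : Prop := 0 ≤ x ∧ x < (n : Int)

def pvEntriesOk (parent : List Int) : Prop := ∀ y ∈ parent, 0 ≤ y ∧ y < (parent.length : Int)

-- well-formed union-find state: every chain reaches a fixpoint within parent.length steps
def pvWF (parent : List Int) : Prop :=
  pvEntriesOk parent ∧ ∀ x, pvRange parent.length x → pvFix parent (pvIter parent parent.length x)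

def pvCVal (comp : List Int) (x : Int) : Int := comp.getD x.toNat 0

-- coupling invariant between A's parent array and B's label array
def pvCoupled (n : Nat) (parent comp : List Int) : Prop :=
  parent.length = n ∧ comp.length = n ∧ pvWF parent ∧
  ∀ i j, pvRange n i → pvRange n j →
    (pvRoot parent i = pvRoot parent j ↔ pvCVal comp i = pvCVal comp j)

theorem pvIter_add (parent : List Int) (a b : Nat) (x : Int) :
    pvIter parent (a + b) x = pvIter parent b (pvIter parent a x) := by
  induction b with
  | zero => rfl
  | succ b ih => rw [← Nat.add_assoc]; simp [pvIter, ih]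

theorem pvFix_iter (parent : List Int) {r : Int} (h : pvFix parent r) (k : Nat) :
    pvIter parent k r = r := by
  induction k with
  | zero => rfl
  | succ k ih => simp [pvIter, ih]; exact h

theorem pvStep_get {parent : List Int} {x : Int} (hx : pvRange parent.length x) :
    PySem.List.pyGet? parent x = some (pvStep parent x) := by
  obtain ⟨h0, h1⟩ : 0 ≤ x ∧ x < (parent.length : Int) := hx
  have hlt : x.toNat < parent.length := by omega
  rw [PySem.List.pyGet?_of_nonneg _ h0, List.getElem?_eq_getElem hlt]
  simp [pvStep, PySem.List.pyGet?_of_nonneg _ h0, List.getElem?_eq_getElem hlt]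

theorem pvStep_range {parent : List Int} (hE : pvEntriesOk parent) {x : Int}
    (hx : pvRange parent.length x) : pvRange parent.length (pvStep parent x) := by
  obtain ⟨h0, h1⟩ : 0 ≤ x ∧ x < (parent.length : Int) := hx
  have hlt : x.toNat < parent.length := by omega
  have heq : pvStep parent x = parent[x.toNat] := by
    simp [pvStep, PySem.List.pyGet?_of_nonneg _ h0, List.getElem?_eq_getElem hlt]
  rw [heq]
  exact hE _ (List.getElem_mem hlt)

theorem pvIter_range {parent : List Int} (hE : pvEntriesOk parent) {x : Int}
    (hx : pvRange parent.length x) (k : Nat) : pvRange parent.length (pvIter parent k x) := by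
  induction k with
  | zero => exact hx
  | succ k ih => exact pvStep_range hE ih

-- a minimal terminating chain has pairwise-distinct vertices, hence length < n
theorem pvMinimal_lt {parent : List Int} (hE : pvEntriesOk parent) {x : Int}
    (hx : pvRange parent.length x) {k : Nat} (hk : pvFix parent (pvIter parent k x))
    (hmin : ∀ m < k, ¬ pvFix parent (pvIter parent m x)) : k < parent.length := by
  by_contra hge
  push_neg at hge
  have hinj : ∀ i ∈ List.range (k + 1), ∀ j ∈ List.range (k + 1),
      pvIter parent i x = pvIter parent j x → i = j := by
    intro i hi j hj heq
    simp [List.mem_range] at hi hj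
    rcases Nat.lt_trichotomy i j with hij | hij | hij
    · exfalso
      have h1 : pvIter parent (i + (k - j)) x = pvIter parent k x := by
        rw [pvIter_add, heq, ← pvIter_add]
        congr 1
        omega
      exact hmin (i + (k - j)) (by omega) (by rw [pvFix, h1]; exact hk)
    · exact hij
    · exfalso
      have h1 : pvIter parent (j + (k - i)) x = pvIter parent k x := by
        rw [pvIter_add, ← heq, ← pvIter_add]
        congr 1
        omega
      exact hmin (j + (k - i)) (by omega) (by rw [pvFix, h1]; exact hk)
  have hnd : (List.map (fun m => pvIter parent m x) (List.range (k + 1))).Nodup :=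
    List.Nodup.map_on hinj (List.nodup_range)
  have hsub : (List.map (fun m => pvIter parent m x) (List.range (k + 1))).toFinset ⊆
      Finset.Ico (0 : Int) (parent.length : Int) := by
    intro y hy
    simp [List.mem_toFinset, List.mem_map] at hy
    obtain ⟨m, _, rfl⟩ := hy
    have := pvIter_range hE hx m
    simp [Finset.mem_Ico]
    exact ⟨this.1, this.2⟩
  have hcard := Finset.card_le_card hsub
  rw [List.toFinset_card_of_nodup hnd] at hcard
  simp [Int.card_Ico] at hcard
  omega

theorem pvRoot_spec {parent : List Int} (hE : pvEntriesOk parent) {x : Int}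
    (hx : pvRange parent.length x) (hT : ∃ k, pvFix parent (pvIter parent k x)) :
    pvFix parent (pvRoot parent x) ∧
      ∀ m, parent.length ≤ m + 1 → pvIter parent m x = pvRoot parent x := by
  classical
  have hfind := Nat.find_spec hT
  have hmin : ∀ m < Nat.find hT, ¬ pvFix parent (pvIter parent m x) :=
    fun m hm => Nat.find_min hT hm
  have hklt : Nat.find hT < parent.length := pvMinimal_lt hE hx hfind hmin
  have key : ∀ m, Nat.find hT ≤ m → pvIter parent m x = pvIter parent (Nat.find hT) x := by
    intro m hm
    have hsplit : m = Nat.find hT + (m - Nat.find hT) := by omega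
    rw [hsplit, pvIter_add, pvFix_iter parent hfind]
  constructor
  · unfold pvRoot
    rw [key parent.length (by omega)]
    exact hfind
  · intro m hm
    unfold pvRoot
    rw [key m (by omega), key parent.length (by omega)]

theorem pvFind_correct {parent : List Int} (hE : pvEntriesOk parent) :
    ∀ (fuel : Nat) (x : Int), pvRange parent.length x →
      (∃ k < fuel, pvFix parent (pvIter parent k x)) →
      pvFindA fuel x parent = some (pvRoot parent x) := by
  intro fuel
  induction fuel with
  | zero =>
    rintro x hx ⟨k, hk, _⟩
    omega
  | succ f ih =>
    rintro x hx ⟨k, hkf, hfix⟩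
    have hT : ∃ k, pvFix parent (pvIter parent k x) := ⟨k, hfix⟩
    have hget := pvStep_get hx
    have hroot := pvRoot_spec hE hx hT
    have hrootrange : pvRange parent.length (pvRoot parent x) := pvIter_range hE hx _
    have hrootget : PySem.List.pyGet? parent (pvRoot parent x) = some (pvRoot parent x) := by
      rw [pvStep_get hrootrange, hroot.1]
    by_cases hfx : pvFix parent x
    · have hxx : pvStep parent x = x := hfx
      have hrx : pvRoot parent x = x := pvFix_iter parent hfx _
      unfold pvFindA
      rw [hget, hxx]
      simp [hrx, hrootget, hxx]
    · have hne : pvStep parent x ≠ x := hfx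
      have hy : pvRange parent.length (pvStep parent x) := pvStep_range hE hx
      have hk0 : k ≠ 0 := by
        rintro rfl
        exact hfx hfix
      obtain ⟨k', rfl⟩ : ∃ k', k = k' + 1 := ⟨k - 1, by omega⟩
      have hstep1 : pvIter parent 1 x = pvStep parent x := rfl
      have hfy : pvFix parent (pvIter parent k' (pvStep parent x)) := by
        rw [← hstep1, ← pvIter_add]
        have : 1 + k' = k' + 1 := by omega
        rw [this]
        exact hfix
      have hrooty : pvRoot parent (pvStep parent x) = pvRoot parent x := by
        have h1 : pvRoot parent (pvStep parent x) = pvIter parent (1 + parent.length) x := by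
          rw [pvIter_add, hstep1]
          rfl
        have h2 : pvIter parent (1 + parent.length) x = pvRoot parent x :=
          hroot.2 _ (by omega)
        rw [h1, h2]
      have hrec := ih (pvStep parent x) hy ⟨k', by omega, hfy⟩
      unfold pvFindA
      rw [hget]
      simp only [hne, if_pos, ne_eq, not_false_eq_true, if_true]
      rw [hrec, hrooty]
      exact hrootget

-- linking one root under another: the new root function and well-formedness
theorem pvLink {parent : List Int} (hW : pvWF parent) {ra rb : Int}
    (hra : pvRange parent.length ra) (hrb : pvRange parent.length rb)
    (hfa : pvFix parent ra) (hfb : pvFix parent rb) (hne : ra ≠ rb) :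
    pvWF (parent.set ra.toNat rb) ∧
      ∀ x, pvRange parent.length x →
        pvRoot (parent.set ra.toNat rb) x =
          if pvRoot parent x = ra then rb else pvRoot parent x := by
  obtain ⟨hE, hWF⟩ := hW
  obtain ⟨ha0, ha1⟩ : 0 ≤ ra ∧ ra < (parent.length : Int) := hra
  obtain ⟨hb0, hb1⟩ : 0 ≤ rb ∧ rb < (parent.length : Int) := hrb
  set par' := parent.set ra.toNat rb with hpar'
  have hlen : par'.length = parent.length := by simp [hpar']
  have hralt : ra.toNat < parent.length := by omega
  have hE' : pvEntriesOk par' := by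
    intro y hy
    rw [hlen]
    rcases List.mem_or_eq_of_mem_set hy with h | rfl
    · exact hE y h
    · exact ⟨hb0, hb1⟩
  have s1 : ∀ x, pvRange parent.length x → x ≠ ra → pvStep par' x = pvStep parent x := by
    intro x hx hxa
    obtain ⟨h0, h1⟩ : 0 ≤ x ∧ x < (parent.length : Int) := hx
    have hxl : x.toNat < parent.length := by omega
    have hxl' : x.toNat < par'.length := by omega
    have e1 : pvStep par' x = par'[x.toNat] := by
      simp [pvStep, PySem.List.pyGet?_of_nonneg _ h0, List.getElem?_eq_getElem hxl']
    have e2 : pvStep parent x = parent[x.toNat] := by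
      simp [pvStep, PySem.List.pyGet?_of_nonneg _ h0, List.getElem?_eq_getElem hxl]
    have hnn : ¬ (ra.toNat = x.toNat) := by omega
    rw [e1, e2]
    simp [hpar', List.getElem_set, hnn]
  have s2 : pvStep par' ra = rb := by
    have hxl' : ra.toNat < par'.length := by omega
    have e1 : pvStep par' ra = par'[ra.toNat] := by
      simp [pvStep, PySem.List.pyGet?_of_nonneg _ ha0, List.getElem?_eq_getElem hxl']
    rw [e1]
    simp [hpar', List.getElem_set]
  have hfb' : pvFix par' rb := by
    show pvStep par' rb = rb
    rw [s1 rb ⟨hb0, hb1⟩ (Ne.symm hne)]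
    exact hfb
  have base : ∀ x, pvRange parent.length x → pvFix parent x →
      (∃ k', pvFix par' (pvIter par' k' x)) ∧
        pvRoot par' x = if pvRoot parent x = ra then rb else pvRoot parent x := by
    intro x hx hfx
    have hrx : pvRoot parent x = x := pvFix_iter parent hfx _
    by_cases hxa : x = ra
    · subst hxa
      have h1 : pvIter par' 1 x = rb := by
        show pvStep par' (pvIter par' 0 x) = rb
        exact s2
      have hterm : pvFix par' (pvIter par' 1 x) := by rw [h1]; exact hfb'
      refine ⟨⟨1, hterm⟩, ?_⟩
      have hr' : pvRoot par' x = rb := by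
        show pvIter par' par'.length x = rb
        rw [hlen, show parent.length = 1 + (parent.length - 1) from by omega,
          pvIter_add, h1, pvFix_iter par' hfb']
      rw [hr', hrx, if_pos rfl]
    · have hfx' : pvFix par' x := by
        show pvStep par' x = x
        rw [s1 x hx hxa]
        exact hfx
      refine ⟨⟨0, hfx'⟩, ?_⟩
      have hr' : pvRoot par' x = x := pvFix_iter par' hfx' _
      rw [hr', hrx, if_neg hxa]
  have main : ∀ k x, pvRange parent.length x → pvFix parent (pvIter parent k x) →
      (∃ k', pvFix par' (pvIter par' k' x)) ∧
        pvRoot par' x = if pvRoot parent x = ra then rb else pvRoot parent x := by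
    intro k
    induction k with
    | zero => exact fun x hx hfix => base x hx hfix
    | succ k ih =>
      intro x hx hfix
      by_cases hfx : pvFix parent x
      · exact base x hx hfx
      · have hxa : x ≠ ra := fun h => hfx (h ▸ hfa)
        have hy : pvRange parent.length (pvStep parent x) := pvStep_range hE hx
        have hstep1 : pvIter parent 1 x = pvStep parent x := rfl
        have hfy : pvFix parent (pvIter parent k (pvStep parent x)) := by
          rw [← hstep1, ← pvIter_add, show 1 + k = k + 1 from by omega]
          exact hfix
        obtain ⟨⟨k', hk'⟩, hry⟩ := ih (pvStep parent x) hy hfy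
        have hs1x : pvStep par' x = pvStep parent x := s1 x hx hxa
        have h1' : pvIter par' 1 x = pvStep parent x := by
          show pvStep par' (pvIter par' 0 x) = pvStep parent x
          exact hs1x
        have hterm : pvFix par' (pvIter par' (k' + 1) x) := by
          rw [show k' + 1 = 1 + k' from by omega, pvIter_add, h1']
          exact hk'
        refine ⟨⟨k' + 1, hterm⟩, ?_⟩
        have hx' : pvRange par'.length x := by rw [hlen]; exact hx
        have hspec' := pvRoot_spec hE' hx' ⟨k' + 1, hterm⟩
        have h3 : pvRoot par' (pvStep parent x) = pvRoot par' x := by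
          have e : pvRoot par' (pvStep parent x) = pvIter par' (1 + par'.length) x := by
            show pvIter par' par'.length (pvStep parent x) = pvIter par' (1 + par'.length) x
            rw [pvIter_add, h1']
          rw [e, show 1 + par'.length = par'.length + 1 from by omega]
          exact hspec'.2 _ (by omega)
        have hspec := pvRoot_spec hE hx ⟨k + 1, hfix⟩
        have h4 : pvRoot parent (pvStep parent x) = pvRoot parent x := by
          have e : pvRoot parent (pvStep parent x) = pvIter parent (1 + parent.length) x := by
            show pvIter parent parent.length (pvStep parent x) = pvIter parent (1 + parent.length) x
            rw [pvIter_add, hstep1]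
          rw [e, show 1 + parent.length = parent.length + 1 from by omega]
          exact hspec.2 _ (by omega)
        rw [← h3, hry, h4]
  constructor
  · refine ⟨hE', ?_⟩
    intro x hx'
    rw [hlen] at hx'
    exact (pvRoot_spec hE' (by rw [hlen]; exact hx') (main parent.length x hx' (hWF x hx')).1).1
  · intro x hx
    exact (main parent.length x hx (hWF x hx)).2

-- pure decision logic of a class merge
theorem pvMergeIff (r1 r2 a b : Int) (_h : r1 ≠ r2) :
    ((if a = r1 then r2 else a) = (if b = r1 then r2 else b) ↔
      (a = b ∨ ((a = r1 ∨ a = r2) ∧ (b = r1 ∨ b = r2)))) := by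
  split_ifs <;> constructor <;> omega

theorem pvCVal_map (comp : List Int) (g : Int → Int) (z : Int) (hz : z.toNat < comp.length) :
    pvCVal (comp.map g) z = g (pvCVal comp z) := by
  unfold pvCVal
  rw [List.getD_eq_getElem _ _ (by simpa using hz), List.getElem_map, List.getD_eq_getElem _ _ hz]

theorem pvCoupled_link {n : Nat} {parent comp : List Int} (hC : pvCoupled n parent comp)
    {u v : Int} (hu : pvRange n u) (hv : pvRange n v)
    (hne : pvRoot parent u ≠ pvRoot parent v) {ra rb : Int}
    (hab : (ra = pvRoot parent u ∧ rb = pvRoot parent v) ∨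
           (ra = pvRoot parent v ∧ rb = pvRoot parent u)) :
    pvCoupled n (parent.set ra.toNat rb)
      (comp.map (fun c => if c = pvCVal comp u then pvCVal comp v else c)) := by
  obtain ⟨hplen, hclen, hW, hInv⟩ := hC
  have hEk := hW.1
  have hpn : ∀ y, pvRange n y → pvRange parent.length y := by
    intro y hy
    rw [hplen]
    exact hy
  have hru : pvRange parent.length (pvRoot parent u) := pvIter_range hEk (hpn u hu) _
  have hrv : pvRange parent.length (pvRoot parent v) := pvIter_range hEk (hpn v hv) _
  have hfixu : pvFix parent (pvRoot parent u) := hW.2 u (hpn u hu)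
  have hfixv : pvFix parent (pvRoot parent v) := hW.2 v (hpn v hv)
  have hrarb : ra ≠ rb := by
    rcases hab with ⟨rfl, rfl⟩ | ⟨rfl, rfl⟩
    · exact hne
    · exact Ne.symm hne
  have hra : pvRange parent.length ra ∧ pvFix parent ra := by
    rcases hab with ⟨rfl, _⟩ | ⟨rfl, _⟩
    · exact ⟨hru, hfixu⟩
    · exact ⟨hrv, hfixv⟩
  have hrb : pvRange parent.length rb ∧ pvFix parent rb := by
    rcases hab with ⟨_, rfl⟩ | ⟨_, rfl⟩
    · exact ⟨hrv, hfixv⟩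
    · exact ⟨hru, hfixu⟩
  have hset : ∀ z : Int, (z = ra ∨ z = rb) ↔ (z = pvRoot parent u ∨ z = pvRoot parent v) := by
    rcases hab with ⟨rfl, rfl⟩ | ⟨rfl, rfl⟩ <;> tauto
  obtain ⟨hWF', hroot'⟩ := pvLink ⟨hEk, hW.2⟩ hra.1 hrb.1 hra.2 hrb.2 hrarb
  have hcucv : pvCVal comp u ≠ pvCVal comp v :=
    fun h => hne ((hInv u v hu hv).mpr h)
  have hcval : ∀ z, pvRange n z →
      pvCVal (comp.map (fun c => if c = pvCVal comp u then pvCVal comp v else c)) z =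
        if pvCVal comp z = pvCVal comp u then pvCVal comp v else pvCVal comp z := by
    intro z hz
    obtain ⟨hz0, hz1⟩ : 0 ≤ z ∧ z < (n : Int) := hz
    have hzl : z.toNat < comp.length := by omega
    rw [pvCVal_map comp _ z hzl]
  refine ⟨by simp [hplen], by simp [hclen], hWF', ?_⟩
  intro i j hi hj
  rw [hroot' i (hpn i hi), hroot' j (hpn j hj), hcval i hi, hcval j hj,
    pvMergeIff ra rb _ _ hrarb, pvMergeIff (pvCVal comp u) (pvCVal comp v) _ _ hcucv]
  have atom : ∀ z, pvRange n z →
      ((pvRoot parent z = ra ∨ pvRoot parent z = rb) ↔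
        (pvCVal comp z = pvCVal comp u ∨ pvCVal comp z = pvCVal comp v)) := by
    intro z hz
    rw [hset (pvRoot parent z), hInv z u hz hu, hInv z v hz hv]
  rw [hInv i j hi hj, atom i hi, atom j hj]

theorem pvUnion_spec {n : Nat} {parent rank : List Int} (hlen : parent.length = n)
    (hW : pvWF parent) (hrk : rank.length = n) {u v : Int}
    (hu : pvRange n u) (hv : pvRange n v) :
    (pvRoot parent u = pvRoot parent v → pvUnionA u v parent rank = some (false, parent, rank)) ∧
    (pvRoot parent u ≠ pvRoot parent v → ∃ ra rb rank',
      ((ra = pvRoot parent u ∧ rb = pvRoot parent v) ∨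
       (ra = pvRoot parent v ∧ rb = pvRoot parent u)) ∧
      pvUnionA u v parent rank = some (true, parent.set ra.toNat rb, rank') ∧
      rank'.length = n) := by
  obtain ⟨hEk, hWF⟩ := hW
  have hpn : ∀ y, pvRange n y → pvRange parent.length y := by
    intro y hy
    rw [hlen]
    exact hy
  have hfindu : pvFindA (parent.length + 1) u parent = some (pvRoot parent u) :=
    pvFind_correct hEk _ u (hpn u hu) ⟨parent.length, by omega, hWF u (hpn u hu)⟩
  have hfindv : pvFindA (parent.length + 1) v parent = some (pvRoot parent v) :=
    pvFind_correct hEk _ v (hpn v hv) ⟨parent.length, by omega, hWF v (hpn v hv)⟩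
  have hru : pvRange parent.length (pvRoot parent u) := pvIter_range hEk (hpn u hu) _
  have hrv : pvRange parent.length (pvRoot parent v) := pvIter_range hEk (hpn v hv) _
  have hrku : pvRange rank.length (pvRoot parent u) := by rw [hrk, ← hlen]; exact hru
  have hrkv : pvRange rank.length (pvRoot parent v) := by rw [hrk, ← hlen]; exact hrv
  have hsetl : ∀ (xs : List Int) (i w : Int), pvRange xs.length i →
      PySem.List.pySet? xs i w = some (xs.set i.toNat w) := by
    intro xs i w hi
    obtain ⟨h0, h1⟩ : 0 ≤ i ∧ i < (xs.length : Int) := hi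
    have hcast : i = ((i.toNat : Nat) : Int) := by omega
    rw [hcast, PySem.List.pySet?_natCast xs i.toNat w (by omega)]
    simp only [Option.some.injEq]
    rfl
  constructor
  · intro heq
    unfold pvUnionA
    rw [hfindu, hfindv, heq]
    simp
  · intro hne
    unfold pvUnionA
    rw [hfindu, hfindv]
    simp only [if_neg hne]
    rw [pvStep_get hrku, pvStep_get hrkv]
    dsimp only
    by_cases hc : pvStep rank (pvRoot parent u) > pvStep rank (pvRoot parent v)
    · rw [if_pos hc, hsetl parent _ _ hrv, hsetl rank _ _ hrku]
      exact ⟨pvRoot parent v, pvRoot parent u,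
        rank.set (pvRoot parent u).toNat (pvStep rank (pvRoot parent u) + pvStep rank (pvRoot parent v)),
        Or.inr ⟨rfl, rfl⟩, rfl, by simp [hrk]⟩
    · rw [if_neg hc, hsetl parent _ _ hru, hsetl rank _ _ hrkv]
      exact ⟨pvRoot parent u, pvRoot parent v,
        rank.set (pvRoot parent v).toNat (pvStep rank (pvRoot parent v) + pvStep rank (pvRoot parent u)),
        Or.inl ⟨rfl, rfl⟩, rfl, by simp [hrk]⟩

theorem pvCVal_get {comp : List Int} {x : Int} (hx : pvRange comp.length x) :
    PySem.List.pyGet? comp x = some (pvCVal comp x) := by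
  obtain ⟨h0, h1⟩ : 0 ≤ x ∧ x < (comp.length : Int) := hx
  have hlt : x.toNat < comp.length := by omega
  rw [PySem.List.pyGet?_of_nonneg _ h0, List.getElem?_eq_getElem hlt]
  unfold pvCVal
  rw [List.getD_eq_getElem _ _ hlt]

-- main loop coupling
theorem pvLoop {n : Nat} :
    ∀ (es : List (Int × Int × Int)) (parent rank comp : List Int)
      (spin maxnot allsum : Int) (flag : Bool) (rej : List Int),
      (∀ e ∈ es, 0 ≤ e.1 ∧ e.1 < e.2.1 ∧ e.2.1 < (n : Int)) →
      pvCoupled n parent comp → rank.length = n →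
      allsum - spin = rej.foldl (· + ·) 0 →
      ((flag = true ∧ maxnot = 0 ∧ rej = []) ∨ (flag = false ∧ ∃ t, rej = maxnot :: t)) →
      ∃ parent' rank' comp' spin' maxnot' allsum' flag' rej',
        es.foldl pvStepA (some (parent, rank, spin, maxnot, allsum, flag)) =
          some (parent', rank', spin', maxnot', allsum', flag') ∧
        es.foldl pvStepB (some (comp, rej)) = some (comp', rej') ∧
        allsum' - spin' = rej'.foldl (· + ·) 0 ∧
        ((flag' = true ∧ maxnot' = 0 ∧ rej' = []) ∨
          (flag' = false ∧ ∃ t, rej' = maxnot' :: t)) := by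
  intro es
  induction es with
  | nil =>
    intro parent rank comp spin maxnot allsum flag rej _ _ _ hsum hflag
    exact ⟨parent, rank, comp, spin, maxnot, allsum, flag, rej, rfl, rfl, hsum, hflag⟩
  | cons e es ih =>
    intro parent rank comp spin maxnot allsum flag rej hb hC hrk hsum hflag
    have he := hb e (List.mem_cons_self)
    have hbes : ∀ e' ∈ es, 0 ≤ e'.1 ∧ e'.1 < e'.2.1 ∧ e'.2.1 < (n : Int) :=
      fun e' h => hb e' (List.mem_cons_of_mem _ h)
    have hu : pvRange n e.1 := ⟨he.1, by have h1 := he.2.1; have h2 := he.2.2; omega⟩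
    have hv : pvRange n e.2.1 := ⟨by have h0 := he.1; have h1 := he.2.1; omega, he.2.2⟩
    obtain ⟨hplen, hclen, hW, hInv⟩ := hC
    have hcu : PySem.List.pyGet? comp e.1 = some (pvCVal comp e.1) :=
      pvCVal_get (by rw [hclen]; exact hu)
    have hcv : PySem.List.pyGet? comp e.2.1 = some (pvCVal comp e.2.1) :=
      pvCVal_get (by rw [hclen]; exact hv)
    have hUspec := pvUnion_spec hplen hW hrk hu hv
    rw [List.foldl_cons, List.foldl_cons]
    by_cases hr : pvRoot parent e.1 = pvRoot parent e.2.1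
    · have hstepA : pvStepA (some (parent, rank, spin, maxnot, allsum, flag)) e =
          some (parent, rank, spin, if flag then e.2.2 else maxnot, allsum + e.2.2, false) := by
        unfold pvStepA
        dsimp only
        rw [hUspec.1 hr]
        cases flag <;> simp
      have hceq : pvCVal comp e.1 = pvCVal comp e.2.1 := (hInv e.1 e.2.1 hu hv).mp hr
      have hstepB : pvStepB (some (comp, rej)) e = some (comp, rej ++ [e.2.2]) := by
        unfold pvStepB
        dsimp only
        rw [hcu, hcv]
        simp [hceq]
      rw [hstepA, hstepB]
      refine ih parent rank comp spin _ _ false (rej ++ [e.2.2]) hbes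
        ⟨hplen, hclen, hW, hInv⟩ hrk ?_ ?_
      · rw [List.foldl_append]
        simp only [List.foldl_cons, List.foldl_nil]
        omega
      · rcases hflag with ⟨hf, hm, hrj⟩ | ⟨hf, t, hrj⟩
        · subst hf hrj
          exact Or.inr ⟨rfl, [], by simp⟩
        · subst hf hrj
          exact Or.inr ⟨rfl, t ++ [e.2.2], by simp⟩
    · obtain ⟨ra, rb, rank', hab, hU, hrk'⟩ := hUspec.2 hr
      have hstepA : pvStepA (some (parent, rank, spin, maxnot, allsum, flag)) e =
          some (parent.set ra.toNat rb, rank', spin + e.2.2, maxnot, allsum + e.2.2, flag) := by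
        unfold pvStepA
        dsimp only
        rw [hU]
        simp
      have hcne : pvCVal comp e.1 ≠ pvCVal comp e.2.1 :=
        fun h => hr ((hInv e.1 e.2.1 hu hv).mpr h)
      have hstepB : pvStepB (some (comp, rej)) e =
          some (comp.map (fun c => if c = pvCVal comp e.1 then pvCVal comp e.2.1 else c), rej) := by
        unfold pvStepB
        dsimp only
        rw [hcu, hcv]
        simp [hcne]
      rw [hstepA, hstepB]
      refine ih _ rank' _ (spin + e.2.2) maxnot (allsum + e.2.2) flag rej hbes
        (pvCoupled_link ⟨hplen, hclen, hW, hInv⟩ hu hv hr hab) hrk' (by omega) hflag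

theorem pvInner (i : Int) : ∀ (l : List (Int × Int)) (acc : List (Int × Int × Int)),
    l.foldl (fun es vw => if i < vw.1 then es ++ [(i, vw.1, vw.2)] else es) acc =
      acc ++ (l.filter (fun vw => i < vw.1)).map (fun vw => (i, vw.1, vw.2)) := by
  intro l
  induction l with
  | nil => simp
  | cons vw l ih =>
    intro acc
    rw [List.foldl_cons]
    by_cases h : i < vw.1
    · rw [if_pos h, ih]
      simp [List.filter_cons, h]
    · rw [if_neg h, ih]
      simp [List.filter_cons, h]

theorem pvOuter : ∀ (L : List (Int × List (Int × Int))) (acc : List (Int × Int × Int)),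
    L.foldl (fun es p =>
        p.2.foldl (fun es vw => if p.1 < vw.1 then es ++ [(p.1, vw.1, vw.2)] else es) es) acc =
      acc ++ L.flatMap
        (fun p => (p.2.filter (fun vw => p.1 < vw.1)).map (fun vw => (p.1, vw.1, vw.2))) := by
  intro L
  induction L with
  | nil => simp
  | cons p L ih =>
    intro acc
    rw [List.foldl_cons, pvInner p.1 p.2 acc, ih]
    simp

theorem pvEdges_eq (G : List (List (Int × Int))) : pvEdgesA G = pvEdgesB G := by
  unfold pvEdgesA pvEdgesB
  rw [pvOuter]
  simp

theorem pvEdgesB_bounds {G : List (List (Int × Int))} (hP : Pre_lufthansa G) :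
    ∀ e ∈ PySem.List.sorted (pvEdgesB G) (fun e => e.2.2) true,
      0 ≤ e.1 ∧ e.1 < e.2.1 ∧ e.2.1 < (G.length : Int) := by
  intro e he
  rw [PySem.List.mem_sorted] at he
  unfold pvEdgesB at he
  rw [List.mem_flatMap] at he
  obtain ⟨p, hp, he2⟩ := he
  rw [List.mem_map] at he2
  obtain ⟨vw, hvw, rfl⟩ := he2
  rw [List.mem_filter] at hvw
  have hlt : p.1 < vw.1 := by simpa using hvw.2
  have hp1 : 0 ≤ p.1 := by
    have hp' := hp
    rw [PySem.List.mem_enumerate_iff] at hp'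
    obtain ⟨k, hk, rfl⟩ := hp'
    simp
  exact ⟨hp1, hlt, hP p hp vw hvw.1 hlt⟩

theorem pvCoupled_init (n : Nat) :
    pvCoupled n (PySem.List.pyRange 0 (n : Int) 1) (PySem.List.pyRange 0 (n : Int) 1) := by
  have hlen : (PySem.List.pyRange 0 (n : Int) 1).length = n := by
    rw [PySem.List.length_pyRange_one]
    simp
  have hfix : ∀ x, pvRange n x → pvFix (PySem.List.pyRange 0 (n : Int) 1) x := by
    intro x hx
    obtain ⟨h0, h1⟩ : 0 ≤ x ∧ x < (n : Int) := hx
    have hlt : x.toNat < (PySem.List.pyRange 0 (n : Int) 1).length := by omega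
    show pvStep (PySem.List.pyRange 0 (n : Int) 1) x = x
    have e1 : pvStep (PySem.List.pyRange 0 (n : Int) 1) x =
        (PySem.List.pyRange 0 (n : Int) 1)[x.toNat] := by
      simp [pvStep, PySem.List.pyGet?_of_nonneg _ h0, List.getElem?_eq_getElem hlt]
    rw [e1, PySem.List.getElem_pyRange_one]
    omega
  have hcval : ∀ x, pvRange n x → pvCVal (PySem.List.pyRange 0 (n : Int) 1) x = x := by
    intro x hx
    obtain ⟨h0, h1⟩ : 0 ≤ x ∧ x < (n : Int) := hx
    have hlt : x.toNat < (PySem.List.pyRange 0 (n : Int) 1).length := by omega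
    unfold pvCVal
    rw [List.getD_eq_getElem _ _ hlt, PySem.List.getElem_pyRange_one]
    omega
  have hroot : ∀ x, pvRange n x → pvRoot (PySem.List.pyRange 0 (n : Int) 1) x = x :=
    fun x hx => pvFix_iter _ (hfix x hx) _
  refine ⟨hlen, hlen, ⟨?_, ?_⟩, ?_⟩
  · intro y hy
    rw [hlen]
    exact PySem.List.mem_pyRange_one.mp hy
  · intro x hx
    rw [hlen] at hx
    have hf := hfix x hx
    show pvFix _ (pvIter _ _ x)
    rw [pvFix_iter _ hf]
    exact hf
  · intro i j hi hj
    rw [hroot i hi, hroot j hj, hcval i hi, hcval j hj]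

-- ===== VERDICT (by name: the statement is the Claim_ definition above) =====
theorem lufthansa_spec : Claim_equal_lufthansa := by
  intro G _ hP
  unfold Spec_lufthansa lufthansa lufthansa_alt
  rw [pvEdges_eq]
  dsimp only
  rw [PySem.List.foldl_pyRange_zero_pyGetD'
    (PySem.List.sorted (pvEdgesB G) (fun e => e.2.2) true) (0, 0, 0) pvStepA _]
  obtain ⟨p', r', c', s', m', a', f', rej', hA, hB, hsum, hflag⟩ :=
    pvLoop (n := G.length) (PySem.List.sorted (pvEdgesB G) (fun e => e.2.2) true)
      (PySem.List.pyRange 0 (G.length : Int) 1) (List.replicate G.length 1)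
      (PySem.List.pyRange 0 (G.length : Int) 1) 0 0 0 true []
      (pvEdgesB_bounds hP) (pvCoupled_init G.length) (by simp) (by simp)
      (Or.inl ⟨rfl, rfl, rfl⟩)
  rw [hA, hB]
  dsimp only
  rcases hflag with ⟨hf, hm, hrj⟩ | ⟨hf, t, hrj⟩
  · subst hm hrj
    simp only [List.foldl_nil] at hsum ⊢
    omega
  · subst hrj
    simp only [List.foldl_cons] at hsum ⊢
    omega
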